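-- pv_equiv track=rewrite | github.com/alias-pyking/InterviewPrep | EPI/nearest_repeated_entry.py | nearest_repeated_entry
-- ===== SOURCE A (Python) =====
-- import collections
--
-- def nearest_repeated_entry(A):
--     dictionary = collections.defaultdict()
--     min_dist = float('inf')
--     for i,v in enumerate(A):
--         if v in dictionary:
--             last_word_equal = dictionary[v]
--             min_dist = min(min_dist, i - last_word_equal)
--         dictionary[v] = i
--     return min_dist if min_dist != float('inf') else -1
-- ===== SOURCE B (Python) =====
-- def nearest_repeated_entry(A):
--     # group: value -> ordered list of all indices where it occurs
--     positions = {}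
--     for i, v in enumerate(A):
--         positions.setdefault(v, []).append(i)
--     # reduce: min gap between consecutive occurrences, over all groups
--     best = None
--     for idxs in positions.values():
--         for prev, cur in zip(idxs, idxs[1:]):
--             d = cur - prev
--             if best is None or d < best:
--                 best = d
--     return best if best is not None else -1
-- ===== Notes on version B (the rewrite author's own statement) =====
-- stated objective: alternative
-- what changed: A keeps only the last index per value and folds a running min in one pass; B first builds a dict mapping each value to the full ordered list of its indices, then a separate second pass reduces each group's consecutive-index gaps to the global minimum.
import Mathlib
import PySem

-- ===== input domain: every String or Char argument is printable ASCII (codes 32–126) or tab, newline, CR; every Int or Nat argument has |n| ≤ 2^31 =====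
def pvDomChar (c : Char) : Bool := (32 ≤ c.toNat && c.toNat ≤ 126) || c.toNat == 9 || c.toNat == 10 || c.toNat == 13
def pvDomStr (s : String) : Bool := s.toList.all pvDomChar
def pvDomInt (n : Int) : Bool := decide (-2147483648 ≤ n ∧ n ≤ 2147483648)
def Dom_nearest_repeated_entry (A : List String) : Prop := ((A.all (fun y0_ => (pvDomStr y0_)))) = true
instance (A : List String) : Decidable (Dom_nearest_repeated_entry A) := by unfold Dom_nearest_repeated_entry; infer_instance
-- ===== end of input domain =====

-- B groups all indices per value first and reduces consecutive gaps in a separate second pass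
-- (objective: alternative decomposition, same asymptotic cost); return values proved equal.

-- ===== PORT A =====
-- A: one pass; dict value -> LAST index; running min over (i - last occurrence).
-- float('inf') sentinel is ported as `none : Option Int` (min(inf, d) = d ↔ opMin none d = some d).
def nearest_repeated_entry (A : List String) : Int :=
  match ((PySem.List.enumerate A).foldl
    (fun (s : PySem.Dict String Int × Option Int) (p : Int × String) =>
      (s.1.insert p.2 p.1,
       if s.1.contains p.2 then
         -- last_word_equal = dictionary[v]; min_dist = min(min_dist, i - last_word_equal)
         (match s.2 with
          | none => some (p.1 - s.1.getD p.2 0)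
          | some mv => some (min mv (p.1 - s.1.getD p.2 0)))
       else s.2))
    (PySem.Dict.empty, none)).2 with
  | some m => m
  | none => -1

-- ===== PORT B =====
-- B: first pass, dict value -> list of ALL indices; second pass over the grouped lists,
-- min over consecutive-index differences; None sentinel, -1 when no value repeats.
def nearest_repeated_entry_alt (A : List String) : Int :=
  match ((PySem.List.enumerate A).foldl
      (fun (d : PySem.Dict String (List Int)) (p : Int × String) =>
        d.insert p.2 (d.getD p.2 [] ++ [p.1]))
      PySem.Dict.empty).values.foldl
    (fun (b : Option Int) (idxs : List Int) =>
      (idxs.zip idxs.tail).foldl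
        (fun (b : Option Int) (pq : Int × Int) =>
          match b with
          | none => some (pq.2 - pq.1)
          | some bv => if pq.2 - pq.1 < bv then some (pq.2 - pq.1) else some bv)
        b)
    none with
  | some b => b
  | none => -1

-- ===== PRECONDITION & SPEC =====
def Spec_nearest_repeated_entry (A : List String) (out : Int) : Prop := out = nearest_repeated_entry_alt A
instance (A : List String) (out : Int) : Decidable (Spec_nearest_repeated_entry A out) := by unfold Spec_nearest_repeated_entry; infer_instance

-- ===== CLAIM (what is proved, stated in full; the proofs are below) =====
def Claim_equal_nearest_repeated_entry : Prop := ∀ (A : List String), Dom_nearest_repeated_entry A → Spec_nearest_repeated_entry A (nearest_repeated_entry A)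

-- ===== LEMMAS AND PROOFS =====

-- the common "running minimum" operation (Python's min lifted over the inf/None sentinel)
def opMin (m : Option Int) (d : Int) : Option Int :=
  match m with
  | none => some d
  | some mv => some (min mv d)

-- consecutive differences of a list of indices
def adjDiffs (l : List Int) : List Int :=
  (l.zip l.tail).map (fun pq => pq.2 - pq.1)

def candList (ps : List (String × List Int)) : List Int :=
  ps.flatMap (fun p => adjDiffs p.2)

theorem opMin_left_comm (m : Option Int) (a b : Int) :
    opMin (opMin m a) b = opMin (opMin m b) a := by
  cases m <;> simp [opMin, min_comm, min_left_comm]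

theorem foldl_opMin_opMin (ys : List Int) (s : Option Int) (d : Int) :
    ys.foldl opMin (opMin s d) = opMin (ys.foldl opMin s) d := by
  induction ys generalizing s with
  | nil => rfl
  | cons y ys ih =>
    simp only [List.foldl_cons]
    rw [opMin_left_comm s d y]
    exact ih (opMin s y)

theorem bstep_eq_opMin :
    (fun (b : Option Int) (pq : Int × Int) =>
      match b with
      | none => some (pq.2 - pq.1)
      | some bv => if pq.2 - pq.1 < bv then some (pq.2 - pq.1) else some bv)
    = (fun b pq => opMin b (pq.2 - pq.1)) := by
  funext b pq
  cases b with
  | none => rfl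
  | some bv =>
    simp only [opMin]
    split_ifs with h <;> simp [min_def] <;> omega

theorem inner_fold_eq (l : List Int) (b : Option Int) :
    (l.zip l.tail).foldl
      (fun (b : Option Int) (pq : Int × Int) =>
        match b with
        | none => some (pq.2 - pq.1)
        | some bv => if pq.2 - pq.1 < bv then some (pq.2 - pq.1) else some bv) b
    = (adjDiffs l).foldl opMin b := by
  unfold adjDiffs
  rw [List.foldl_map, bstep_eq_opMin]

theorem adjDiffs_append (l : List Int) (x i : Int) (h : l.getLast? = some x) :
    adjDiffs (l ++ [i]) = adjDiffs l ++ [i - x] := by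
  induction l with
  | nil => simp at h
  | cons a t ih =>
    cases t with
    | nil => simp_all [adjDiffs]
    | cons b t' =>
      simp only [List.getLast?_cons_cons] at h
      have := ih h
      simp only [adjDiffs, List.cons_append, List.zip_cons_cons, List.tail_cons,
        List.map_cons] at this ⊢
      simp [this]

theorem candList_append_empty (ps : List (String × List Int)) (v : String) (i : Int) :
    candList (ps ++ [(v, [i])]) = candList ps := by
  simp [candList, adjDiffs]

-- replacing the (unique) entry for key v, whose list l is nonempty, by l ++ [i]
-- adds exactly the candidate i - last l to the running minimum
theorem candList_replace (ps : List (String × List Int)) (v : String) (l : List Int)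
    (x i : Int) (s : Option Int)
    (hmem : (v, l) ∈ ps) (hnd : (ps.map (·.1)).Nodup) (hlast : l.getLast? = some x) :
    (candList (ps.map (fun p => if p.1 == v then (v, l ++ [i]) else p))).foldl opMin s
      = opMin ((candList ps).foldl opMin s) (i - x) := by
  induction ps generalizing s with
  | nil => simp at hmem
  | cons p tl ih =>
    simp only [List.map_cons, List.nodup_cons, List.mem_map] at hnd
    by_cases hp : p.1 = v
    · -- head is the v-entry; by nodup it must be (v, l), and tail has no key v
      have hpeq : p = (v, l) := by
        rcases List.mem_cons.mp hmem with h | h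
        · exact h.symm
        · exact absurd ⟨(v, l), h, by rw [hp]⟩ hnd.1
      have htl : tl.map (fun p => if p.1 == v then (v, l ++ [i]) else p) = tl := by
        apply List.map_congr_left (g := id) (fun q hq => ?_) |>.trans (List.map_id tl)
        have : q.1 ≠ v := fun hqv => hnd.1 ⟨q, hq, by rw [hqv, hp]⟩
        simp [this]
      subst hpeq
      rw [List.map_cons, htl]
      have hif : (if ((v, l).1 == v) = true then (v, l ++ [i]) else (v, l)) = (v, l ++ [i]) := by
        simp
      rw [hif]
      simp only [candList, List.flatMap_cons, adjDiffs_append l x i hlast]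
      simp only [List.foldl_append, List.foldl_cons, List.foldl_nil, foldl_opMin_opMin]
    · have hmem' : (v, l) ∈ tl := by
        rcases List.mem_cons.mp hmem with h | h
        · exact absurd (by rw [← h]) hp
        · exact h
      have hne : (p.1 == v) = false := by simp [hp]
      rw [List.map_cons]
      simp only [hne, Bool.false_eq_true, if_false]
      simp only [candList, List.flatMap_cons, List.foldl_append]
      exact ih _ hmem' hnd.2

-- B's reduction of a grouped dictionary
def redB (g : PySem.Dict String (List Int)) : Option Int :=
  (candList g.items).foldl opMin none

-- the step functions of the two ports
def stepA (s : PySem.Dict String Int × Option Int) (p : Int × String) :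
    PySem.Dict String Int × Option Int :=
  (s.1.insert p.2 p.1,
   if s.1.contains p.2 then
     (match s.2 with
      | none => some (p.1 - s.1.getD p.2 0)
      | some mv => some (min mv (p.1 - s.1.getD p.2 0)))
   else s.2)

def stepB (d : PySem.Dict String (List Int)) (p : Int × String) :
    PySem.Dict String (List Int) :=
  d.insert p.2 (d.getD p.2 [] ++ [p.1])

-- the coupled invariant, pushed through the whole enumerate list
theorem main_invariant (l : List (Int × String))
    (dA : PySem.Dict String Int) (g : PySem.Dict String (List Int)) (m : Option Int)
    (hnd : g.keys.Nodup)
    (hne : ∀ v lv, g.get? v = some lv → lv ≠ [])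
    (hlast : ∀ v, dA.get? v = (g.getD v []).getLast?)
    (hm : m = redB g) :
    (l.foldl stepA (dA, m)).2 = redB (l.foldl stepB g) := by
  induction l generalizing dA g m with
  | nil => simpa using hm
  | cons p tl ih =>
    obtain ⟨i, v⟩ := p
    simp only [List.foldl_cons]
    apply ih
    · exact PySem.Dict.nodup_keys_insert g v _ hnd
    · intro w lw hw
      simp only [stepB, PySem.Dict.get?_insert] at hw
      split_ifs at hw with hwv
      · cases hw; simp
      · exact hne w lw hw
    · intro w
      simp only [stepB, PySem.Dict.get?_insert, PySem.Dict.getD_insert]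
      split_ifs with hwv
      · simp
      · exact hlast w
    · -- the running minimum stays equal to B's reduction of the grouped dict
      simp only [stepB]
      by_cases hc : dA.contains v = true
      · -- v seen before: A adds candidate i - last; in g the v-group is nonempty
        have hsome : (dA.get? v).isSome := by
          rwa [← PySem.Dict.contains_eq_isSome_get?]
        obtain ⟨x, hx⟩ := Option.isSome_iff_exists.mp hsome
        have hgl : (g.getD v []).getLast? = some x := by rw [← hlast v, hx]
        have hgne : g.getD v [] ≠ [] := by
          intro h0; rw [h0] at hgl; simp at hgl
        have hgc : g.get? v = some (g.getD v []) := by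
          cases hgv : g.get? v with
          | none => exact absurd (by simp [PySem.Dict.getD_eq_get?_getD, hgv]) hgne
          | some lv => simp [PySem.Dict.getD_eq_get?_getD, hgv]
        have hcg : g.contains v = true := by
          rw [PySem.Dict.contains_eq_isSome_get?, hgc]; rfl
        have hmemg : (v, g.getD v []) ∈ g.items :=
          PySem.Dict.mem_items_of_get?_eq_some g hgc
        have hdA : dA.getD v 0 = x := PySem.Dict.getD_of_get?_eq_some dA 0 hx
        simp only [hc, if_true, redB,
          PySem.Dict.items_insert_of_contains g (g.getD v [] ++ [i]) hcg]
        rw [candList_replace g.items v (g.getD v []) x i none hmemg hnd hgl,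
          ← redB, ← hm, hdA]
        cases m <;> rfl
      · -- v unseen: no candidate added, the new singleton group contributes nothing
        have hnone : dA.get? v = none := by
          cases hdv : dA.get? v with
          | none => rfl
          | some x => exact absurd (by rw [PySem.Dict.contains_eq_isSome_get?, hdv]; rfl) hc
        have hgl : (g.getD v []).getLast? = none := by rw [← hlast v, hnone]
        have hg0 : g.getD v [] = [] := by
          cases hgv : g.getD v [] with
          | nil => rfl
          | cons a t => rw [hgv] at hgl; simp at hgl
        have hgc : g.contains v = false := by
          cases hgv : g.get? v with
          | none => rw [PySem.Dict.contains_eq_isSome_get?, hgv]; rfl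
          | some lv =>
            have h1 : lv ≠ [] := hne v lv hgv
            have h2 : lv = [] := by
              rw [PySem.Dict.getD_eq_get?_getD, hgv] at hg0; exact hg0
            exact absurd h2 h1
        simp only [hc, Bool.false_eq_true, if_false, redB, hg0, List.nil_append,
          PySem.Dict.items_insert_of_not_contains g [i] hgc, candList_append_empty]
        exact hm

-- collapsing B's nested value-loop into the flatMap reduction
theorem outer_fold_eq (ls : List (List Int)) (s : Option Int) :
    ls.foldl
      (fun (b : Option Int) (idxs : List Int) =>
        (idxs.zip idxs.tail).foldl
          (fun (b : Option Int) (pq : Int × Int) =>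
            match b with
            | none => some (pq.2 - pq.1)
            | some bv => if pq.2 - pq.1 < bv then some (pq.2 - pq.1) else some bv) b) s
    = (ls.flatMap adjDiffs).foldl opMin s := by
  simp only [inner_fold_eq]
  induction ls generalizing s with
  | nil => rfl
  | cons l ls ih =>
    simp only [List.foldl_cons, List.flatMap_cons, List.foldl_append]
    exact ih _

theorem alt_eq_redB (A : List String) :
    nearest_repeated_entry_alt A
      = (match redB ((PySem.List.enumerate A).foldl stepB PySem.Dict.empty) with
         | some b => b
         | none => -1) := by
  unfold nearest_repeated_entry_alt
  rw [outer_fold_eq]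
  have : ∀ g : PySem.Dict String (List Int),
      (g.values.flatMap adjDiffs).foldl opMin none = redB g := by
    intro g
    simp only [redB, candList, PySem.Dict.values, List.flatMap_map]
  rw [this]
  rfl

-- ===== VERDICT (by name: the statement is the Claim_ definition above) =====
theorem nearest_repeated_entry_spec : Claim_equal_nearest_repeated_entry := by
  intro A _
  unfold Spec_nearest_repeated_entry
  rw [alt_eq_redB]
  unfold nearest_repeated_entry
  rw [show (List.foldl
      (fun (s : PySem.Dict String Int × Option Int) (p : Int × String) =>
        (s.1.insert p.2 p.1,
         if s.1.contains p.2 then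
           (match s.2 with
            | none => some (p.1 - s.1.getD p.2 0)
            | some mv => some (min mv (p.1 - s.1.getD p.2 0)))
         else s.2))
      (PySem.Dict.empty, none) (PySem.List.enumerate A))
    = List.foldl stepA (PySem.Dict.empty, none) (PySem.List.enumerate A) from rfl]
  rw [main_invariant (PySem.List.enumerate A) PySem.Dict.empty PySem.Dict.empty none
    (by simp)
    (by intro v lv h; simp [PySem.Dict.get?_empty] at h)
    (by intro v; simp [PySem.Dict.get?_empty, PySem.Dict.getD_empty])
    (by rfl)]
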